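-- pv_equiv track=rewrite | github.com/Poofox/holoseed_nexus | 5_Scripts/veil.py | veil
-- ===== SOURCE A (Python) =====
-- def veil(text, offset):
--     """Apply the veil cipher. Self-inverse with same offset."""
--     result = []
--     for c in text:
--         if 'a' <= c <= 'z':
--             shifted = chr((ord(c) - ord('a') - offset) % 26 + ord('A'))
--             result.append(shifted)
--         elif 'A' <= c <= 'Z':
--             shifted = chr((ord(c) - ord('A') + offset) % 26 + ord('a'))
--             result.append(shifted)
--         else:
--             result.append(c)
--     return ''.join(result)
-- ===== SOURCE B (Python) =====
-- def veil(text, offset):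
--     """Apply the veil cipher. Self-inverse with same offset."""
--     table = {}
--     for i in range(26):
--         table[ord('a') + i] = chr((i - offset) % 26 + ord('A'))
--         table[ord('A') + i] = chr((i + offset) % 26 + ord('a'))
--     return text.translate(table)
-- ===== Notes on version B (the rewrite author's own statement) =====
-- stated objective: idiomatic
-- what changed: Replaced the per-character if/elif/else branching loop with a 52-entry translation table built once per call and a single table-driven pass via str.translate.
import Mathlib
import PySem

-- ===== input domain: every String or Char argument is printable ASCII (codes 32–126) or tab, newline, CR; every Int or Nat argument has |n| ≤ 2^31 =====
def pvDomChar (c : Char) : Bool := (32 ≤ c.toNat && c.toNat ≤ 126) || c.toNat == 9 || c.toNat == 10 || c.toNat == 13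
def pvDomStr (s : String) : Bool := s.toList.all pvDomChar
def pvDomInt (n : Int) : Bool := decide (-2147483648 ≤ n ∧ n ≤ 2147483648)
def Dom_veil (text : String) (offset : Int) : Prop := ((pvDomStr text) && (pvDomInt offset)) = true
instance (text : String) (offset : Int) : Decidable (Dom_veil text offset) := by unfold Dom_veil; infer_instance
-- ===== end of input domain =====

-- B replaces A's per-character if/elif branching with a 52-entry translation table built
-- once per call and a single table-driven pass (Python's str.translate); objective: idiomatic.

-- ===== PORT A =====
-- literal port of A: a fold over the characters appending one char per step, joined at the end
def veil (text : String) (offset : Int) : String :=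
  String.mk
    (text.toList.foldl (fun (result : List Char) c =>
      if 'a' ≤ c ∧ c ≤ 'z' then
        result ++ [Char.ofNat ((PySem.Int.mod (((c.toNat : Int)) - 97 - offset) 26 + 65).toNat)]
      else if 'A' ≤ c ∧ c ≤ 'Z' then
        result ++ [Char.ofNat ((PySem.Int.mod (((c.toNat : Int)) - 65 + offset) 26 + 97).toNat)]
      else
        result ++ [c]) [])

-- ===== PORT B =====
-- one iteration of Source B's table-building loop (two dict entries per i)
def veilStep (offset : Int) (d : PySem.Dict Char Char) (i : Int) : PySem.Dict Char Char :=
  (d.insert (Char.ofNat (97 + i.toNat))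
      (Char.ofNat ((PySem.Int.mod (i - offset) 26 + 65).toNat))).insert
    (Char.ofNat (65 + i.toNat))
      (Char.ofNat ((PySem.Int.mod (i + offset) 26 + 97).toNat))

-- port of B: build the translation table over range(26), then translate = map each char
-- through the table (characters without an entry pass through unchanged, as str.translate does)
def veil_alt (text : String) (offset : Int) : String :=
  let table := (PySem.List.pyRange 0 26 1).foldl (veilStep offset) PySem.Dict.empty
  String.mk (text.toList.map (fun c => (table.get? c).getD c))

-- ===== PRECONDITION & SPEC =====
def Spec_veil (text : String) (offset : Int) (out : String) : Prop := out = veil_alt text offset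
instance (text : String) (offset : Int) (out : String) : Decidable (Spec_veil text offset out) := by unfold Spec_veil; infer_instance

-- ===== CLAIM (what is proved, stated in full; the proofs are below) =====
def Claim_equal_veil : Prop := ∀ (text : String) (offset : Int), Dom_veil text offset → Spec_veil text offset (veil text offset)

-- ===== LEMMAS AND PROOFS =====

-- what A computes for one character
def veilChar (offset : Int) (c : Char) : Char :=
  if 'a' ≤ c ∧ c ≤ 'z' then
    Char.ofNat ((PySem.Int.mod (((c.toNat : Int)) - 97 - offset) 26 + 65).toNat)
  else if 'A' ≤ c ∧ c ≤ 'Z' then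
    Char.ofNat ((PySem.Int.mod (((c.toNat : Int)) - 65 + offset) 26 + 97).toNat)
  else c

theorem char_eq_ofNat_iff (c : Char) (k : Nat) (hk : k < 200) :
    (c = Char.ofNat k) ↔ c.toNat = k := by
  have hofk : (Char.ofNat k).toNat = k := by
    simp [Char.toNat_ofNat, Nat.isValidChar]; omega
  constructor
  · intro h; subst h; exact hofk
  · intro h
    apply Char.ext
    have h1 : c.val.toNat = (Char.ofNat k).val.toNat := by
      simp only [Char.toNat] at h hofk; omega
    exact UInt32.toNat_inj.mp h1

theorem char_le_iff (a c : Char) : (a ≤ c) ↔ a.toNat ≤ c.toNat := by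
  simp only [Char.le_def, UInt32.le_iff_toNat_le]
  exact Iff.rfl

-- characterisation of the partially built table (first n iterations of Source B's loop)
theorem table_get (offset : Int) (n : Nat) (hn : n ≤ 26) (c : Char) :
    ((PySem.List.pyRange 0 (n : Int) 1).foldl (veilStep offset) PySem.Dict.empty).get? c =
      if 97 ≤ c.toNat ∧ c.toNat < 97 + n then
        some (Char.ofNat ((PySem.Int.mod (((c.toNat : Int)) - 97 - offset) 26 + 65).toNat))
      else if 65 ≤ c.toNat ∧ c.toNat < 65 + n then
        some (Char.ofNat ((PySem.Int.mod (((c.toNat : Int)) - 65 + offset) 26 + 97).toNat))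
      else none := by
  induction n with
  | zero =>
      have hnil : PySem.List.pyRange 0 ((0 : Nat) : Int) 1 = [] := by decide
      rw [hnil]
      simp only [List.foldl_nil, PySem.Dict.get?_empty]
      split_ifs with hz1 hz2
      · exact absurd hz1 (by omega)
      · exact absurd hz2 (by omega)
      · rfl
  | succ m ih =>
      have hm : m ≤ 26 := by omega
      have hr : PySem.List.pyRange 0 ((m : Int) + 1) 1
          = PySem.List.pyRange 0 (m : Int) 1 ++ [(m : Int)] :=
        PySem.List.pyRange_one_succ_right (by positivity)
      have hcast : ((m + 1 : Nat) : Int) = (m : Int) + 1 := by push_cast; ring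
      rw [hcast, hr, List.foldl_append]
      simp only [List.foldl]
      rw [veilStep]
      rw [PySem.Dict.get?_insert, PySem.Dict.get?_insert]
      have htn : ((m : Int)).toNat = m := by simp
      rw [htn]
      by_cases h2 : c = Char.ofNat (65 + m)
      · have hc : c.toNat = 65 + m := (char_eq_ofNat_iff c (65 + m) (by omega)).mp h2
        rw [if_pos h2]
        split_ifs with ha hb
        · exact absurd ha (by omega)
        · have he : (m : Int) + offset = ((c.toNat : Int)) - 65 + offset := by
            rw [hc]; push_cast; ring
          rw [he]
        · exact absurd (show 65 ≤ c.toNat ∧ c.toNat < 65 + (m + 1) by omega) hb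
      · rw [if_neg h2]
        by_cases h1 : c = Char.ofNat (97 + m)
        · have hc : c.toNat = 97 + m := (char_eq_ofNat_iff c (97 + m) (by omega)).mp h1
          rw [if_pos h1]
          have he : (m : Int) - offset = ((c.toNat : Int)) - 97 - offset := by
            rw [hc]; push_cast; ring
          split_ifs with ha hb
          · rw [he]
          · exact absurd (show 97 ≤ c.toNat ∧ c.toNat < 97 + (m + 1) by omega) ha
          · exact absurd (show 97 ≤ c.toNat ∧ c.toNat < 97 + (m + 1) by omega) ha
        · have hne1 : c.toNat ≠ 97 + m := fun h =>
            h1 ((char_eq_ofNat_iff c (97 + m) (by omega)).mpr h)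
          have hne2 : c.toNat ≠ 65 + m := fun h =>
            h2 ((char_eq_ofNat_iff c (65 + m) (by omega)).mpr h)
          rw [if_neg h1, ih hm]
          split_ifs <;> first | rfl | omega

-- per-character agreement: A's branching equals B's table lookup with identity default
theorem char_agree (offset : Int) (c : Char) :
    veilChar offset c =
      ((((PySem.List.pyRange 0 26 1).foldl (veilStep offset) PySem.Dict.empty).get? c).getD c) := by
  have h26 : ((26 : Nat) : Int) = (26 : Int) := by norm_num
  rw [← h26, table_get offset 26 (le_refl 26) c, veilChar]
  by_cases hl : 'a' ≤ c ∧ c ≤ 'z'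
  · have h1 : 97 ≤ c.toNat := (char_le_iff 'a' c).mp hl.1
    have h2 : c.toNat ≤ 122 := (char_le_iff c 'z').mp hl.2
    rw [if_pos hl, if_pos (show 97 ≤ c.toNat ∧ c.toNat < 97 + 26 by omega)]
    rfl
  · rw [if_neg hl]
    have hln : ¬ (97 ≤ c.toNat ∧ c.toNat < 97 + 26) := by
      intro h
      exact hl ⟨(char_le_iff 'a' c).mpr h.1,
        (char_le_iff c 'z').mpr (show c.toNat ≤ 122 by omega)⟩
    rw [if_neg hln]
    by_cases hu : 'A' ≤ c ∧ c ≤ 'Z'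
    · have h1 : 65 ≤ c.toNat := (char_le_iff 'A' c).mp hu.1
      have h2 : c.toNat ≤ 90 := (char_le_iff c 'Z').mp hu.2
      rw [if_pos hu, if_pos (show 65 ≤ c.toNat ∧ c.toNat < 65 + 26 by omega)]
      rfl
    · have hun : ¬ (65 ≤ c.toNat ∧ c.toNat < 65 + 26) := by
        intro h
        exact hu ⟨(char_le_iff 'A' c).mpr h.1,
          (char_le_iff c 'Z').mpr (show c.toNat ≤ 90 by omega)⟩
      rw [if_neg hu, if_neg hun]
      rfl

-- A's accumulating fold is the map of veilChar
theorem veil_eq_map (text : String) (offset : Int) :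
    veil text offset = String.mk (text.toList.map (veilChar offset)) := by
  rw [veil]
  have hfun : (fun (result : List Char) c =>
      if 'a' ≤ c ∧ c ≤ 'z' then
        result ++ [Char.ofNat ((PySem.Int.mod (((c.toNat : Int)) - 97 - offset) 26 + 65).toNat)]
      else if 'A' ≤ c ∧ c ≤ 'Z' then
        result ++ [Char.ofNat ((PySem.Int.mod (((c.toNat : Int)) - 65 + offset) 26 + 97).toNat)]
      else
        result ++ [c])
      = fun (result : List Char) c => result ++ [veilChar offset c] := by
    funext result c
    rw [veilChar]
    split_ifs <;> rfl
  rw [hfun, PySem.List.foldl_append_singleton_eq_map, List.nil_append]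

-- ===== VERDICT (by name: the statement is the Claim_ definition above) =====
theorem veil_spec : Claim_equal_veil := by
  intro text offset _
  unfold Spec_veil veil_alt
  rw [veil_eq_map]
  exact congrArg String.mk (List.map_congr_left (fun c _ => char_agree offset c))
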